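-- pv_equiv track=rewrite | github.com/JuhiZanje/DLAssignment3 | SequenceModel_With_Attention/train_with_attention.py | assign_tensor_to_generated_sequences
-- ===== SOURCE A (Python) =====
-- def assign_tensor_to_generated_sequences(sequence):
--     seq_list = sequence.split()
--     final_tensor = ""
--     for word in seq_list:
--         final_tensor+=word
--
--     final_length = 0
--     for word in seq_list:
--         final_length += len(word)
--
--     return final_tensor,final_length
-- ===== SOURCE B (Python) =====
-- def assign_tensor_to_generated_sequences(sequence):
--     chars = [c for c in sequence if not c.isspace()]
--     return "".join(chars), len(chars)
-- ===== Notes on version B (the rewrite author's own statement) =====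
-- stated objective: alternative
-- what changed: B never splits the string into words: it makes one character-level pass that filters out whitespace characters (str.split() discards exactly the whitespace), returning that filtered string and its length, instead of A's split followed by two word-level accumulation loops.
import Mathlib
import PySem

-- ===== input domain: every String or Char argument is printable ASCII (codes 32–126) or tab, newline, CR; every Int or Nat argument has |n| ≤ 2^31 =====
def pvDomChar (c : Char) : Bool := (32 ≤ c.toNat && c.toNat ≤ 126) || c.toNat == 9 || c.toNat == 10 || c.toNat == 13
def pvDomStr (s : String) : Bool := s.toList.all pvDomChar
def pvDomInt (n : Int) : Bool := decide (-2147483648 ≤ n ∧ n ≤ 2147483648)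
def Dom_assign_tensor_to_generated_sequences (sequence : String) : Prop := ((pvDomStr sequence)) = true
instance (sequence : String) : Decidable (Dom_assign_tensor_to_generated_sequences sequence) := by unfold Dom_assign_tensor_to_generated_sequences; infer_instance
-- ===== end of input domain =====

-- B never splits into words: one character-level pass filters out the whitespace
-- (exactly what split() discards) and returns the filtered string with its length
-- (objective: alternative).

-- ===== PORT A =====
def assign_tensor_to_generated_sequences (sequence : String) : String × Int :=
  let seq_list := PySem.Str.split₀ sequence
  let final_tensor := seq_list.foldl (fun acc w => acc ++ w) ""
  let final_length := seq_list.foldl (fun acc w => acc + PySem.Str.len w) (0 : Int)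
  (final_tensor, final_length)

-- ===== PORT B =====
def assign_tensor_to_generated_sequences_alt (sequence : String) : String × Int :=
  let chars := sequence.toList.filter (fun c => !PySem.Chars.isspace c)
  (String.ofList chars, (chars.length : Int))

-- ===== PRECONDITION & SPEC =====
def Spec_assign_tensor_to_generated_sequences (sequence : String) (out : String × Int) : Prop := out = assign_tensor_to_generated_sequences_alt sequence
instance (sequence : String) (out : String × Int) : Decidable (Spec_assign_tensor_to_generated_sequences sequence out) := by unfold Spec_assign_tensor_to_generated_sequences; infer_instance

-- ===== CLAIM (what is proved, stated in full; the proofs are below) =====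
def Claim_equal_assign_tensor_to_generated_sequences : Prop := ∀ (sequence : String), Dom_assign_tensor_to_generated_sequences sequence → Spec_assign_tensor_to_generated_sequences sequence (assign_tensor_to_generated_sequences sequence)

-- ===== LEMMAS AND PROOFS =====

-- The flattening of split₀'s word list is the string with its whitespace removed.
theorem split₀_go_flatten (s cur : List Char) (acc : List (List Char)) :
    (PySem.Chars.split₀.go s cur acc).flatten
      = acc.reverse.flatten ++ cur.reverse ++ s.filter (fun c => !PySem.Chars.isspace c) := by
  induction s generalizing cur acc with
  | nil =>
    by_cases h : cur.isEmpty
    · simp_all [PySem.Chars.split₀.go]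
    · simp_all [PySem.Chars.split₀.go]
  | cons c rest ih =>
    by_cases hs : PySem.Chars.isspace c
    · by_cases h : cur.isEmpty
      · have : cur = [] := by simpa using h
        simp [PySem.Chars.split₀.go, hs, ih, this]
      · simp [PySem.Chars.split₀.go, hs, h, ih]
    · simp [PySem.Chars.split₀.go, hs, ih]

theorem split₀_flatten (s : List Char) :
    (PySem.Chars.split₀ s).flatten = s.filter (fun c => !PySem.Chars.isspace c) := by
  simpa using split₀_go_flatten s [] []

-- A's concatenation loop, seen through toList, flattens the word list.
theorem foldl_strcat_toList (ws : List String) (acc : String) :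
    (ws.foldl (fun a w => a ++ w) acc).toList
      = acc.toList ++ (ws.map String.toList).flatten := by
  induction ws generalizing acc with
  | nil => simp
  | cons w ws ih => simp [List.foldl_cons, ih, String.toList_append]

-- A's length loop sums the word lengths = length of the flattening.
theorem foldl_len_eq (ws : List String) (acc : Int) :
    ws.foldl (fun a w => a + PySem.Str.len w) acc
      = acc + ((ws.map String.toList).flatten.length : Int) := by
  induction ws generalizing acc with
  | nil => simp
  | cons w ws ih =>
    rw [List.foldl_cons, ih]
    simp [PySem.Str.len_eq]
    ring

-- ===== VERDICT (by name: the statement is the Claim_ definition above) =====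
theorem assign_tensor_to_generated_sequences_spec : Claim_equal_assign_tensor_to_generated_sequences := by
  intro sequence _
  unfold Spec_assign_tensor_to_generated_sequences
  unfold assign_tensor_to_generated_sequences assign_tensor_to_generated_sequences_alt
  set ws := PySem.Str.split₀ sequence with hws
  have hflat : (ws.map String.toList).flatten
      = sequence.toList.filter (fun c => !PySem.Chars.isspace c) := by
    rw [hws, PySem.Str.split₀_map_toList, split₀_flatten]
  refine Prod.ext ?_ ?_
  · show ws.foldl (fun a w => a ++ w) "" = _
    rw [← String.toList_inj, foldl_strcat_toList, hflat]
    simp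
  · show ws.foldl (fun a w => a + PySem.Str.len w) 0 = _
    rw [foldl_len_eq, hflat]
    simp
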